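-- pv_equiv track=rewrite | github.com/KaitMArms/Kaitlyn-s-Coding-Practice | Python/2DArrayQ2.py | rooksAreSafe
-- ===== SOURCE A (Python) =====
-- def rooksAreSafe(board):
--     seenRows = set()
--     seenCols = set()
--
--     for r in range(len(board)):
--         for c in range(len(board[0])):
--             if board[r][c] == 1:
--                 if r in seenRows or c in seenCols: return False
--                 seenRows.add(r)
--                 seenCols.add(c)
--
--     return True
-- ===== SOURCE B (Python) =====
-- def _noConflict(rooks):
--     if not rooks:
--         return True
--     (r, c) = rooks[0]
--     rest = rooks[1:]
--     for (r2, c2) in rest: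
--         if r == r2 or c == c2:
--             return False
--     return _noConflict(rest)
--
--
-- def rooksAreSafe(board):
--     rooks = [(r, c)
--              for r in range(len(board))
--              for c in range(len(board[0]))
--              if board[r][c] == 1]
--     return _noConflict(rooks)
-- ===== Notes on version B (the rewrite author's own statement) =====
-- stated objective: alternative
-- what changed: B collects all rook coordinates in one scan and then recursively checks each rook pairwise against the remaining rooks for a shared row or column, using no sets at all.
-- outside the precondition, e.g. on rooksAreSafe([[1, 0], [0]]): A raises IndexError, B raises IndexError; on rooksAreSafe([[1, 1], [0]]): A returns False, B raises IndexError
import Mathlib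
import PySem

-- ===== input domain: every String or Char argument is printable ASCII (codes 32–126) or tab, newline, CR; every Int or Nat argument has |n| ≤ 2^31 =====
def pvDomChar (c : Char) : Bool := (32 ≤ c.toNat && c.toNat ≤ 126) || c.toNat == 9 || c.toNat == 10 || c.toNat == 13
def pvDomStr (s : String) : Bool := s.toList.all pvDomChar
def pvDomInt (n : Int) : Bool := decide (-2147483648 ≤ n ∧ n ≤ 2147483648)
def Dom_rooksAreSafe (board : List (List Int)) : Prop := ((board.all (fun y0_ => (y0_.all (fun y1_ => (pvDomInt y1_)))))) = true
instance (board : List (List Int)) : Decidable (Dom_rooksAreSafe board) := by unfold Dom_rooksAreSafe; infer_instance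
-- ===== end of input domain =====

-- B gathers every rook coordinate first and then checks the rooks pairwise (each rook
-- against all later rooks) for a shared row or column, using no sets at all (alternative).

-- ===== PORT A =====
-- inner loop 'for c in range(len(board[0]))'; the early 'return False' is Option none
def pvAInner (row : List Int) (r : Int) : List Int → PySem.Set Int → PySem.Set Int →
    Option (PySem.Set Int × PySem.Set Int)
  | [], sr, sc => some (sr, sc)
  | c :: cs, sr, sc =>
    if ((PySem.List.pyGet? row c).getD 0) == 1 then
      if PySem.Set.contains sr r || PySem.Set.contains sc c then none
      else pvAInner row r cs (PySem.Set.add sr r) (PySem.Set.add sc c)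
    else pvAInner row r cs sr sc

-- outer loop 'for r in range(len(board))'
def pvAOuter (board : List (List Int)) (cs : List Int) :
    List Int → PySem.Set Int → PySem.Set Int → Bool
  | [], _, _ => true
  | r :: rs, sr, sc =>
    match pvAInner ((PySem.List.pyGet? board r).getD []) r cs sr sc with
    | none => false
    | some st => pvAOuter board cs rs st.1 st.2

def rooksAreSafe (board : List (List Int)) : Bool :=
  pvAOuter board (PySem.List.pyRange 0 (((PySem.List.pyGet? board 0).getD []).length) 1)
    (PySem.List.pyRange 0 board.length 1) PySem.Set.empty PySem.Set.empty

-- ===== PORT B =====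
-- Source B's 'for (r2, c2) in rest: if r == r2 or c == c2: return False'
def pvClash (r c : Int) : List (Int × Int) → Bool
  | [] => false
  | p :: l => if r == p.1 || c == p.2 then true else pvClash r c l

-- Source B's recursive _noConflict over the rook list
def pvNoConflict : List (Int × Int) → Bool
  | [] => true
  | p :: rest => if pvClash p.1 p.2 rest then false else pvNoConflict rest

-- Source B's comprehension gathering the rook coordinates
def pvBRooks (board : List (List Int)) : List (Int × Int) :=
  (PySem.List.pyRange 0 board.length 1).flatMap (fun r =>
    ((PySem.List.pyRange 0 ((PySem.List.pyGet? board 0).getD []).length 1).filter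
      (fun c => ((PySem.List.pyGet? ((PySem.List.pyGet? board r).getD []) c).getD 0) == 1)).map
      (fun c => (r, c)))

def rooksAreSafe_alt (board : List (List Int)) : Bool :=
  pvNoConflict (pvBRooks board)

-- ===== PRECONDITION & SPEC =====
-- Pre_ excludes ragged boards having a row shorter than row 0: there A raises IndexError unless an
-- earlier conflict already returned False, and B's full gather always raises IndexError on them.
def Pre_rooksAreSafe (board : List (List Int)) : Prop :=
  board = [] ∨ ∀ row ∈ board, (board.headD []).length ≤ row.length
instance (board : List (List Int)) : Decidable (Pre_rooksAreSafe board) := by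
  unfold Pre_rooksAreSafe; infer_instance
def pvWitness_rooksAreSafe : List (List Int) := [[1, 0], [0, 1]]

def Spec_rooksAreSafe (board : List (List Int)) (out : Bool) : Prop := out = rooksAreSafe_alt board
instance (board : List (List Int)) (out : Bool) : Decidable (Spec_rooksAreSafe board out) := by
  unfold Spec_rooksAreSafe; infer_instance

-- ===== CLAIM (what is proved, stated in full; the proofs are below) =====
def Claim_equal_rooksAreSafe : Prop := ∀ (board : List (List Int)), Dom_rooksAreSafe board →
  Pre_rooksAreSafe board → Spec_rooksAreSafe board (rooksAreSafe board)

-- ===== LEMMAS AND PROOFS =====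

-- the columns of cs holding a rook in 'row'
def pvKs (cs row : List Int) : List Int :=
  cs.filter (fun c => ((PySem.List.pyGet? row c).getD 0) == 1)

-- closed form for A's inner loop over one row, as a function of that row's rook columns
def pvAInnerSpec (r : Int) (sr sc : PySem.Set Int) :
    List Int → Option (PySem.Set Int × PySem.Set Int)
  | [] => some (sr, sc)
  | c :: rest =>
    if PySem.Set.contains sr r || PySem.Set.contains sc c then none
    else if rest.isEmpty then some (PySem.Set.add sr r, PySem.Set.add sc c) else none

lemma aInner_eq (row : List Int) (r : Int) : ∀ (cs : List Int) (sr sc : PySem.Set Int),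
    pvAInner row r cs sr sc = pvAInnerSpec r sr sc (pvKs cs row) := by
  intro cs
  induction cs with
  | nil => simp [pvAInner, pvKs, pvAInnerSpec]
  | cons c cs ih =>
    intro sr sc
    by_cases h : (((PySem.List.pyGet? row c).getD 0) == 1) = true
    · have hks : pvKs (c :: cs) row = c :: pvKs cs row := by
        simp [pvKs, h]
      rw [hks]
      by_cases hcb : r ∈ sr ∨ c ∈ sc
      · simp [pvAInner, h, hcb, pvAInnerSpec]
      · have hl : pvAInner row r (c :: cs) sr sc =
            pvAInner row r cs (PySem.Set.add sr r) (PySem.Set.add sc c) := by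
          simp [pvAInner, h, hcb]
        rw [hl, ih]
        push Not at hcb
        rcases hks2 : pvKs cs row with _ | ⟨c2, rest2⟩
        · simp [pvAInnerSpec, hcb]
        · have hr : r ∈ PySem.Set.add sr r := by
            rw [PySem.Set.mem_add]; right; rfl
          simp [pvAInnerSpec, hr]
    · have hks : pvKs (c :: cs) row = pvKs cs row := by
        simp [pvKs, h]
      rw [hks, ← ih]
      simp [pvAInner, h]

-- gathered row indices / column indices over a list of (index, row) pairs
def pvRows (cs : List Int) (l : List (Int × List Int)) : List Int :=
  l.flatMap (fun p => (pvKs cs p.2).map (fun _ => p.1))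
def pvCols (cs : List Int) (l : List (Int × List Int)) : List Int :=
  l.flatMap (fun p => pvKs cs p.2)

lemma aOuter_iff (board : List (List Int)) (cs : List Int) :
    ∀ (rs : List Int) (sr sc : PySem.Set Int),
    (pvAOuter board cs rs sr sc = true ↔
      ((pvRows cs (rs.map (fun r => (r, (PySem.List.pyGet? board r).getD [])))).Nodup ∧
       (∀ x ∈ pvRows cs (rs.map (fun r => (r, (PySem.List.pyGet? board r).getD []))), x ∉ sr) ∧
       (pvCols cs (rs.map (fun r => (r, (PySem.List.pyGet? board r).getD [])))).Nodup ∧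
       (∀ x ∈ pvCols cs (rs.map (fun r => (r, (PySem.List.pyGet? board r).getD []))), x ∉ sc))) := by
  intro rs
  induction rs with
  | nil => simp [pvAOuter, pvRows, pvCols]
  | cons r rs ih =>
    intro sr sc
    simp only [pvAOuter, aInner_eq]
    rcases hks : pvKs cs ((PySem.List.pyGet? board r).getD []) with _ | ⟨c, rest⟩
    · simp only [pvAInnerSpec, List.map_cons, pvRows, pvCols, List.flatMap_cons, hks,
        List.map_nil, List.nil_append]
      exact ih sr sc
    · by_cases hcb : r ∈ sr ∨ c ∈ sc
      · have hspec : pvAInnerSpec r sr sc (c :: rest) = none := by simp [pvAInnerSpec, hcb]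
        rw [hspec]
        simp only [pvRows, pvCols, List.map_cons, List.flatMap_cons, hks]
        constructor
        · intro hf; exact absurd hf (by simp)
        · rintro ⟨h1, h2, h3, h4⟩
          rcases hcb with hr | hc
          · exact absurd hr (h2 r (by simp))
          · exact absurd hc (h4 c (by simp))
      · rcases rest with _ | ⟨c2, rest2⟩
        · have hspec : pvAInnerSpec r sr sc [c] =
              some (PySem.Set.add sr r, PySem.Set.add sc c) := by
            simp [pvAInnerSpec, hcb]
          rw [hspec]
          rw [ih]
          simp only [pvRows, pvCols, List.map_cons, List.flatMap_cons, hks,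
            List.map_cons, List.map_nil, List.cons_append, List.nil_append,
            List.nodup_cons, List.mem_cons, PySem.Set.mem_add]
          push Not at hcb
          constructor
          · rintro ⟨h1, h2, h3, h4⟩
            refine ⟨⟨?_, h1⟩, ?_, ⟨?_, h3⟩, ?_⟩
            · intro hm; exact h2 r hm (Or.inr rfl)
            · intro x hx
              rcases hx with hx | hx
              · subst hx; exact hcb.1
              · intro hm; exact h2 x hx (Or.inl hm)
            · intro hm; exact h4 c hm (Or.inr rfl)
            · intro x hx
              rcases hx with hx | hx
              · subst hx; exact hcb.2
              · intro hm; exact h4 x hx (Or.inl hm)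
          · rintro ⟨⟨h0, h1⟩, h2, ⟨h5, h3⟩, h4⟩
            refine ⟨h1, ?_, h3, ?_⟩
            · intro x hx
              rintro (hm | hm)
              · exact h2 x (Or.inr hx) hm
              · subst hm; exact h0 hx
            · intro x hx
              rintro (hm | hm)
              · exact h4 x (Or.inr hx) hm
              · subst hm; exact h5 hx
        · have hspec : pvAInnerSpec r sr sc (c :: c2 :: rest2) = none := by
            simp [pvAInnerSpec, hcb]
          rw [hspec]
          simp only [pvRows, pvCols, List.map_cons, List.flatMap_cons, hks]
          constructor
          · intro hf; exact absurd hf (by simp)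
          · rintro ⟨h1, h2, h3, h4⟩
            simp [List.nodup_cons] at h1

-- B's clash scan is false exactly when the head rook shares no row/column with the rest
lemma clash_false_iff (r c : Int) : ∀ (l : List (Int × Int)),
    pvClash r c l = false ↔ ∀ p ∈ l, r ≠ p.1 ∧ c ≠ p.2 := by
  intro l
  induction l with
  | nil => simp [pvClash]
  | cons p l ih =>
    have heq : pvClash r c (p :: l) =
        if (r == p.1 || c == p.2) = true then true else pvClash r c l := rfl
    rw [heq]
    by_cases h : (r == p.1 || c == p.2) = true
    · rw [if_pos h]
      simp only [Bool.or_eq_true, beq_iff_eq] at h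
      constructor
      · intro hf; simp at hf
      · intro hall
        rcases hall p (by simp) with ⟨h1, h2⟩
        rcases h with h | h
        · exact absurd h h1
        · exact absurd h h2
    · rw [if_neg h, ih]
      simp only [Bool.or_eq_true, beq_iff_eq] at h
      push Not at h
      constructor
      · intro hall q hq
        rcases List.mem_cons.mp hq with hq | hq
        · subst hq; exact h
        · exact hall q hq
      · intro hall q hq; exact hall q (List.mem_cons_of_mem _ hq)

-- B's pairwise check is the double-nodup test on the projections
lemma noConflict_iff : ∀ (l : List (Int × Int)),
    pvNoConflict l = true ↔ (l.map Prod.fst).Nodup ∧ (l.map Prod.snd).Nodup := by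
  intro l
  induction l with
  | nil => simp [pvNoConflict]
  | cons p l ih =>
    have heq : pvNoConflict (p :: l) =
        if pvClash p.1 p.2 l = true then false else pvNoConflict l := rfl
    rw [heq]
    by_cases h : pvClash p.1 p.2 l = true
    · rw [if_pos h]
      constructor
      · intro hf; simp at hf
      · rintro ⟨h1, h2⟩
        rw [← Bool.not_eq_false, clash_false_iff] at h
        push Not at h
        rcases h with ⟨q, hq, hbad⟩
        simp only [List.map_cons, List.nodup_cons] at h1 h2
        by_cases hfst : p.1 = q.1
        · exact absurd (List.mem_map.mpr ⟨q, hq, hfst.symm⟩) h1.1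
        · have hsnd : p.2 = q.2 := by tauto
          exact absurd (List.mem_map.mpr ⟨q, hq, hsnd.symm⟩) h2.1
    · rw [if_neg h, ih]
      have h' : ∀ q ∈ l, p.1 ≠ q.1 ∧ p.2 ≠ q.2 :=
        (clash_false_iff p.1 p.2 l).mp (by simpa using h)
      simp only [List.map_cons, List.nodup_cons, List.mem_map]
      constructor
      · rintro ⟨h1, h2⟩
        refine ⟨⟨?_, h1⟩, ?_, h2⟩
        · rintro ⟨q, hq, he⟩; exact (h' q hq).1 he.symm
        · rintro ⟨q, hq, he⟩; exact (h' q hq).2 he.symm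
      · rintro ⟨⟨_, h1⟩, _, h2⟩; exact ⟨h1, h2⟩

-- the two projections of B's gathered rook list
lemma rooks_fst (board : List (List Int)) :
    (pvBRooks board).map Prod.fst =
      pvRows (PySem.List.pyRange 0 ((PySem.List.pyGet? board 0).getD []).length 1)
        ((PySem.List.pyRange 0 board.length 1).map
          (fun r => (r, (PySem.List.pyGet? board r).getD []))) := by
  simp [pvBRooks, pvRows, pvKs, List.map_flatMap, List.map_map, List.flatMap_map]

lemma rooks_snd (board : List (List Int)) :
    (pvBRooks board).map Prod.snd =
      pvCols (PySem.List.pyRange 0 ((PySem.List.pyGet? board 0).getD []).length 1)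
        ((PySem.List.pyRange 0 board.length 1).map
          (fun r => (r, (PySem.List.pyGet? board r).getD []))) := by
  simp [pvBRooks, pvCols, pvKs, List.map_flatMap, List.map_map, List.flatMap_map]

-- ===== VERDICT (by name: the statement is the Claim_ definition above) =====
theorem rooksAreSafe_spec : Claim_equal_rooksAreSafe := by
  intro board _ _
  unfold Spec_rooksAreSafe
  rw [rooksAreSafe, rooksAreSafe_alt, Bool.eq_iff_iff, aOuter_iff, noConflict_iff,
    rooks_fst, rooks_snd]
  simp [PySem.Set.empty]
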